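-- pv_equiv track=rewrite | github.com/WojciechAdamiec/UWR | 2018-2019/WDPP/L8Z2.py | function
-- ===== SOURCE A (Python) =====
-- def function(n, m):
--     dic = {}
--     dic2 = {}
--     for e in n:
--         if e is not ' ':
--             if e in dic:
--                 dic[e] = dic[e] + 1
--             else:
--                 dic[e] = 1
--     for e in m:
--         if e is not ' ':
--             if e in dic2:
--                 dic2[e] = dic2[e] + 1
--             else:
--                 dic2[e] = 1
--     for d in dic:
--         if d not in dic2 or dic[d] > dic2[d]:
--             return "Nie"
--     return "Tak"
-- ===== SOURCE B (Python) =====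
-- def function(n, m):
--     need = {}
--     for e in n:
--         if e != ' ':
--             need[e] = need.get(e, 0) + 1
--     for e in m:
--         if e != ' ' and e in need:
--             need[e] = need[e] - 1
--     for v in need.values():
--         if v > 0:
--             return "Nie"
--     return "Tak"
-- ===== Notes on version B (the rewrite author's own statement) =====
-- stated objective: simpler
-- what changed: B keeps a single signed-count table: it counts n's non-space chars, decrements while scanning m instead of building a second counter, and reports 'Nie' iff some residual count stays positive.
import Mathlib
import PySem

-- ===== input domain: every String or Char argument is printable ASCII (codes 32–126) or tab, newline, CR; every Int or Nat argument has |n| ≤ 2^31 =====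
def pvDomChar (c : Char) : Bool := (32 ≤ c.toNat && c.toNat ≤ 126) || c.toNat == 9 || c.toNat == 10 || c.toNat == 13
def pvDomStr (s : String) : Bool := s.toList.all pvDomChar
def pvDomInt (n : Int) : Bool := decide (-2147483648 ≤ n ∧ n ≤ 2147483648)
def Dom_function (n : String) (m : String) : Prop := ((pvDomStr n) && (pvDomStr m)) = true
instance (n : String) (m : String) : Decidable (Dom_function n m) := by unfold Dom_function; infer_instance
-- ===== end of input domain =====

-- B keeps one signed-count table (count n's non-space chars, decrement along m, test residuals)
-- instead of A's two counters compared key by key; objective: simpler.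

-- ===== PORT A =====
-- A's final 'for d in dic: if …: return "Nie"' early-return loop, as a recursion over the key list
def pvCheckKeys (ks : List Char) (dic dic2 : PySem.Dict Char Int) : String :=
  match ks with
  | [] => "Tak"
  | d :: rest =>
      if ¬ (dic2.contains d = true) ∨ dic.getD d 0 > dic2.getD d 0 then "Nie"
      else pvCheckKeys rest dic dic2

def function (n : String) (m : String) : String :=
  let dic := n.toList.foldl (fun d e =>
    if ¬ (e = ' ') then
      (if d.contains e = true then d.insert e (d.getD e 0 + 1) else d.insert e 1)
    else d) (PySem.Dict.empty : PySem.Dict Char Int)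
  let dic2 := m.toList.foldl (fun d e =>
    if ¬ (e = ' ') then
      (if d.contains e = true then d.insert e (d.getD e 0 + 1) else d.insert e 1)
    else d) (PySem.Dict.empty : PySem.Dict Char Int)
  pvCheckKeys dic.keys dic dic2

-- ===== PORT B =====
def function_alt (n : String) (m : String) : String :=
  let need := n.toList.foldl (fun d e =>
    if ¬ (e = ' ') then d.modify e 0 (· + 1) else d) (PySem.Dict.empty : PySem.Dict Char Int)
  let need := m.toList.foldl (fun d e =>
    if ¬ (e = ' ') ∧ d.contains e = true then d.modify e 0 (· - 1) else d) need
  if need.values.any (fun v => v > 0) then "Nie" else "Tak"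

-- ===== PRECONDITION & SPEC =====
def Spec_function (n : String) (m : String) (out : String) : Prop := out = function_alt n m
instance (n : String) (m : String) (out : String) : Decidable (Spec_function n m out) := by unfold Spec_function; infer_instance

-- ===== CLAIM (what is proved, stated in full; the proofs are below) =====
def Claim_equal_function : Prop := ∀ (n : String) (m : String), Dom_function n m → Spec_function n m (function n m)

-- ===== LEMMAS AND PROOFS =====

-- A's key-check loop returns "Nie" exactly when some key violates the multiset condition
theorem pvCheckKeys_eq (ks : List Char) (d1 d2 : PySem.Dict Char Int) :
    pvCheckKeys ks d1 d2 =
      if ∃ k ∈ ks, ¬ (d2.contains k = true) ∨ d1.getD k 0 > d2.getD k 0 then "Nie" else "Tak" := by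
  induction ks with
  | nil => simp [pvCheckKeys]
  | cons k rest ih =>
      simp only [pvCheckKeys, ih]
      by_cases h : d2.contains k = false ∨ d2.getD k 0 < d1.getD k 0 <;>
        by_cases hr : ∃ x ∈ rest, d2.contains x = false ∨ d2.getD x 0 < d1.getD x 0 <;>
        simp [h, hr]

-- A's counting loop builds Counter(of the non-space chars)
theorem pvFoldA_eq_counter (l : List Char) :
    l.foldl (fun d e =>
      if ¬ (e = ' ') then
        (if d.contains e = true then d.insert e (d.getD e 0 + 1) else d.insert e 1)
      else d) (PySem.Dict.empty : PySem.Dict Char Int)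
    = PySem.Dict.counter (l.filter (fun e => decide (¬ e = ' '))) := by
  rw [PySem.List.foldl_congr_mem l _
      (fun d e => if ¬ (e = ' ') then d.insert e (d.getD e 0 + 1) else d) _ ?_]
  · rw [PySem.List.foldl_ite_eq_foldl_filter]
    exact PySem.Dict.foldl_insert_getD_add_one_eq_counter _
  · intro acc x _
    by_cases hc : acc.contains x = true
    · simp [hc]
    · have h0 : acc.getD x 0 = 0 :=
        PySem.Dict.getD_of_not_contains acc 0 (by simpa using hc)
      simp [hc, h0]

-- B's counting loop builds the same Counter
theorem pvFoldB1_eq_counter (l : List Char) :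
    l.foldl (fun d e => if ¬ (e = ' ') then d.modify e 0 (· + 1) else d)
        (PySem.Dict.empty : PySem.Dict Char Int)
    = PySem.Dict.counter (l.filter (fun e => decide (¬ e = ' '))) := by
  rw [PySem.List.foldl_ite_eq_foldl_filter]
  exact (PySem.Dict.counter_eq_foldl _).symm

-- B's decrement loop never changes which keys are present
theorem pvKeysB (l : List Char) (d : PySem.Dict Char Int) :
    (l.foldl (fun d e => if ¬ (e = ' ') ∧ d.contains e = true then d.modify e 0 (· - 1) else d) d).keys
    = d.keys := by
  induction l generalizing d with
  | nil => rfl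
  | cons e l ih =>
      simp only [List.foldl_cons]
      by_cases h : ¬ (e = ' ') ∧ d.contains e = true
      · rw [if_pos h, ih, PySem.Dict.keys_modify, PySem.Dict.keys_insert_of_contains]
        simpa using h.2
      · rw [if_neg h, ih]

-- value of a key after B's decrement loop: old value minus the non-space occurrences in l (if the key is present)
theorem pvGetDB (l : List Char) (d : PySem.Dict Char Int) (v : Char) :
    (l.foldl (fun d e => if ¬ (e = ' ') ∧ d.contains e = true then d.modify e 0 (· - 1) else d) d).getD v 0
    = d.getD v 0 - (if d.contains v = true then (((l.filter (fun e => decide (¬ e = ' '))).count v : Int)) else 0) := by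
  induction l generalizing d with
  | nil => simp
  | cons e l ih =>
      simp only [List.foldl_cons, List.filter_cons]
      by_cases h : ¬ (e = ' ') ∧ d.contains e = true
      · rw [if_pos h, ih]
        rw [PySem.Dict.contains_modify]
        by_cases hv : v = e
        · subst hv
          rw [PySem.Dict.getD_modify_self]
          simp [h.1, h.2]
          ring
        · rw [PySem.Dict.getD_modify_of_ne d 0 _ hv]
          have hbe : (v == e) = false := by simp [hv]
          simp only [hbe, Bool.false_or]
          simp [h.1, Ne.symm hv]
      · rw [if_neg h, ih]
        by_cases he : (e = ' ')
        · simp [he]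
        · have hc : d.contains e = false := by
            cases hcc : d.contains e
            · rfl
            · exact absurd ⟨he, hcc⟩ h
          by_cases hv : v = e
          · subst hv; simp [hc]
          · simp [he, Ne.symm hv]

theorem pvMain (n m : String) : function n m = function_alt n m := by
  unfold function function_alt
  simp only [pvFoldA_eq_counter, pvFoldB1_eq_counter, pvCheckKeys_eq]
  set nf := n.toList.filter (fun e => decide (¬ e = ' ')) with hnf
  set mf := m.toList.filter (fun e => decide (¬ e = ' ')) with hmf
  set need2 := m.toList.foldl
      (fun d e => if ¬ (e = ' ') ∧ d.contains e = true then d.modify e 0 (· - 1) else d)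
      (PySem.Dict.counter nf) with hneed2
  have hkeys : need2.keys = PySem.Set.ofList nf := by
    rw [hneed2, pvKeysB, PySem.Dict.keys_counter]
  have hnd : need2.keys.Nodup := by rw [hkeys]; exact PySem.Set.nodup_ofList nf
  rw [PySem.Dict.values_eq_map_keys need2 hnd 0, List.any_map, hkeys, PySem.Dict.keys_counter]
  simp only [Function.comp_def]
  have hiff : (∃ k ∈ PySem.Set.ofList nf,
        ¬ ((PySem.Dict.counter mf).contains k = true) ∨
          (PySem.Dict.counter nf).getD k 0 > (PySem.Dict.counter mf).getD k 0)
      ↔ ((PySem.Set.ofList nf).any (fun k => decide (need2.getD k 0 > 0)) = true) := by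
    simp only [List.any_eq_true, decide_eq_true_eq]
    refine exists_congr fun k => and_congr_right fun hk => ?_
    have hknf : k ∈ nf := (PySem.Set.mem_ofList nf k).mp hk
    have hcnt_n : 0 < nf.count k := List.count_pos_iff.mpr hknf
    have hcontk : (PySem.Dict.counter nf).contains k = true := by
      rw [PySem.Dict.contains_counter]; simpa using hknf
    have hg : need2.getD k 0 = (nf.count k : Int) - (mf.count k : Int) := by
      rw [hneed2, pvGetDB, PySem.Dict.getD_counter, hcontk, if_pos rfl]
    rw [hg, PySem.Dict.getD_counter, PySem.Dict.getD_counter, PySem.Dict.contains_counter]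
    by_cases hm : k ∈ mf
    · have hmc : mf.contains k = true := by simpa using hm
      simp only [hmc]
      constructor
      · rintro (h | h)
        · simp at h
        · omega
      · intro h; right; omega
    · have hc0 : mf.count k = 0 := by
        simpa using List.count_eq_zero.mpr hm
      have hmc : mf.contains k = false := by simpa using hm
      simp only [hmc]
      constructor
      · intro _; omega
      · intro _; left; simp
  by_cases h : ∃ k ∈ PySem.Set.ofList nf,
      ¬ ((PySem.Dict.counter mf).contains k = true) ∨
        (PySem.Dict.counter nf).getD k 0 > (PySem.Dict.counter mf).getD k 0
  · rw [if_pos h, if_pos (hiff.mp h)]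
  · rw [if_neg h, if_neg (fun hb => h (hiff.mpr hb))]

-- ===== VERDICT (by name: the statement is the Claim_ definition above) =====
theorem function_spec : Claim_equal_function := fun n m _ => pvMain n m
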